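-- pv_equiv track=rewrite | github.com/delthia/AdventOfCode | 2024/day02/solution.py | count_safe
-- ===== SOURCE A (Python) =====
-- positive = lambda n: True if n > 0 else False
--
-- def count_safe(reports: list[tuple[int]]) -> int:
--     safe = 0
--
--     for report in reports:
--         prev = report[0]
--         sign = None
--
--         for pos in report[1:]:
--             dif = pos-prev
--
--             if abs(dif) > 3:
--                 break
--             elif dif == 0:
--                 break
--             elif positive(dif) != sign and sign is not None:
--                 break
--
--             prev = pos
--             sign = positive(dif)
--         else:
--             safe += 1
--
--     return safe
-- ===== SOURCE B (Python) =====
-- def count_safe(reports: list[tuple[int]]) -> int: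
--     def safe(report):
--         diffs = [b - a for a, b in zip(report, report[1:])]
--         return all(1 <= d <= 3 for d in diffs) or all(-3 <= d <= -1 for d in diffs)
--     return sum(1 for report in reports if safe(report))
-- ===== Notes on version B (the rewrite author's own statement) =====
-- stated objective: simpler
-- what changed: Replaces the stateful break/else loop tracking prev and sign with building the adjacent-difference list via zip and two all() reductions (all diffs in 1..3 or all in -3..-1), counted with sum(). (Pre_ excludes inputs containing an empty report, on which A raises IndexError at report[0]; B would return counting it as safe.)
import Mathlib
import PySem

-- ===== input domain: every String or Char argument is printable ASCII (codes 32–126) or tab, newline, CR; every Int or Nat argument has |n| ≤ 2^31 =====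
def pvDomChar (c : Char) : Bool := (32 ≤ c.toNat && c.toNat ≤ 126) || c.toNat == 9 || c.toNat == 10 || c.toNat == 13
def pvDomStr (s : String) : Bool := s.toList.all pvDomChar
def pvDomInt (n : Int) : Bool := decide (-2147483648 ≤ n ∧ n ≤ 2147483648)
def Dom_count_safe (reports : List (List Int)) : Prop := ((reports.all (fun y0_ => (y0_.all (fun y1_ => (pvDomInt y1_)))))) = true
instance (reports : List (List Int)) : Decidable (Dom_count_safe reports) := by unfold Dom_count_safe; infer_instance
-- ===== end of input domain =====

-- B replaces A's stateful break/else loop (prev/sign state) with zip-built adjacent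
-- differences and two all-reductions; return values only, no speed claim.

-- ===== PORT A =====
-- positive = lambda n: True if n > 0 else False
def pvPositive (n : Int) : Bool := if n > 0 then true else false

-- the inner 'for pos in report[1:] … else' loop: returns true iff the loop completes without break
def pvInnerA (prev : Int) (sign : Option Bool) (rest : List Int) : Bool :=
  match rest with
  | [] => true
  | pos :: t =>
    let dif := pos - prev
    if |dif| > 3 then false
    else if dif = 0 then false
    else if sign.elim false (fun s => pvPositive dif != s) then false
    else pvInnerA pos (some (pvPositive dif)) t

def count_safe (reports : List (List Int)) : Int :=
  reports.foldl (fun safe report =>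
    match PySem.List.pyGet? report 0 with
    | none => safe          -- report[0] raises IndexError; excluded by Pre_count_safe
    | some prev =>
      if pvInnerA prev none (PySem.List.slice report (some 1) none) then safe + 1 else safe) 0

-- ===== PORT B =====
def pvSafeB (report : List Int) : Bool :=
  let diffs := (report.zip (report.drop 1)).map (fun p => p.2 - p.1)
  diffs.all (fun d => decide (1 ≤ d) && decide (d ≤ 3)) ||
  diffs.all (fun d => decide (-3 ≤ d) && decide (d ≤ -1))

def count_safe_alt (reports : List (List Int)) : Int :=
  reports.foldl (fun acc report => if pvSafeB report then acc + 1 else acc) 0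

-- ===== PRECONDITION & SPEC =====
-- Pre_ excludes inputs containing an empty report: there A raises IndexError at report[0].
def Pre_count_safe (reports : List (List Int)) : Prop := ∀ r ∈ reports, r ≠ []
instance (reports : List (List Int)) : Decidable (Pre_count_safe reports) := by unfold Pre_count_safe; infer_instance
def pvWitness_count_safe : List (List Int) := [[1, 2, 3], [5, 1], [7]]

def Spec_count_safe (reports : List (List Int)) (out : Int) : Prop := out = count_safe_alt reports
instance (reports : List (List Int)) (out : Int) : Decidable (Spec_count_safe reports out) := by unfold Spec_count_safe; infer_instance

-- ===== CLAIM (what is proved, stated in full; the proofs are below) =====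
def Claim_equal_count_safe : Prop := ∀ (reports : List (List Int)), Dom_count_safe reports → Pre_count_safe reports → Spec_count_safe reports (count_safe reports)

-- ===== LEMMAS AND PROOFS =====

-- all adjacent diffs of (prev :: rest) lie in 1..3 / in -3..-1 (structural forms)
def pvAllP (prev : Int) : List Int → Bool
  | [] => true
  | x :: t => (decide (1 ≤ x - prev) && decide (x - prev ≤ 3)) && pvAllP x t

def pvAllN (prev : Int) : List Int → Bool
  | [] => true
  | x :: t => (decide (-3 ≤ x - prev) && decide (x - prev ≤ -1)) && pvAllN x t

theorem pvInnerA_eq (rest : List Int) : ∀ (prev : Int) (sign : Option Bool),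
    pvInnerA prev sign rest =
      match sign with
      | none => pvAllP prev rest || pvAllN prev rest
      | some true => pvAllP prev rest
      | some false => pvAllN prev rest := by
  induction rest with
  | nil => intro prev sign; cases sign with
    | none => rfl
    | some s => cases s <;> rfl
  | cons x t ih =>
    intro prev sign
    have hpos : ∀ d : Int, pvPositive d = decide (0 < d) := by
      intro d; simp [pvPositive]
    have eP : ∀ p : Int, (decide (1 ≤ x - p) && decide (x - p ≤ 3)) = decide (1 ≤ x - p ∧ x - p ≤ 3) := by
      intro p; simp
    have eN : ∀ p : Int, (decide (-3 ≤ x - p) && decide (x - p ≤ -1)) = decide (-3 ≤ x - p ∧ x - p ≤ -1) := by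
      intro p; simp
    cases sign with
    | none =>
      simp only [pvInnerA, pvAllP, pvAllN, ih, hpos, gt_iff_lt, lt_abs, eP, eN, Option.elim]
      by_cases h1 : 3 < x - prev ∨ 3 < -(x - prev)
      · rw [if_pos (by simpa using h1)]
        rw [show (decide (1 ≤ x - prev ∧ x - prev ≤ 3)) = false from by simp; omega,
            show (decide (-3 ≤ x - prev ∧ x - prev ≤ -1)) = false from by simp; omega]
        simp
      · rw [if_neg (by simpa using h1)]
        by_cases h2 : x - prev = 0
        · rw [if_pos h2]
          rw [show (decide (1 ≤ x - prev ∧ x - prev ≤ 3)) = false from by simp; omega,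
              show (decide (-3 ≤ x - prev ∧ x - prev ≤ -1)) = false from by simp; omega]
          simp
        · rw [if_neg h2]
          by_cases h3 : (0 : Int) < x - prev
          · rw [show (decide (0 < x - prev)) = true from by simpa using h3]
            rw [show (decide (1 ≤ x - prev ∧ x - prev ≤ 3)) = true from by simp; omega,
                show (decide (-3 ≤ x - prev ∧ x - prev ≤ -1)) = false from by simp; omega]
            simp
          · rw [show (decide (0 < x - prev)) = false from by simpa using h3]
            rw [show (decide (1 ≤ x - prev ∧ x - prev ≤ 3)) = false from by simp; omega,
                show (decide (-3 ≤ x - prev ∧ x - prev ≤ -1)) = true from by simp; omega]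
            simp
    | some s =>
      cases s with
      | true =>
        simp only [pvInnerA, pvAllP, ih, hpos, gt_iff_lt, lt_abs, eP, Option.elim]
        by_cases h1 : 3 < x - prev ∨ 3 < -(x - prev)
        · rw [if_pos (by simpa using h1),
              show (decide (1 ≤ x - prev ∧ x - prev ≤ 3)) = false from by simp; omega]
          simp
        · rw [if_neg (by simpa using h1)]
          by_cases h2 : x - prev = 0
          · rw [if_pos h2,
                show (decide (1 ≤ x - prev ∧ x - prev ≤ 3)) = false from by simp; omega]
            simp
          · rw [if_neg h2]
            by_cases h3 : (0 : Int) < x - prev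
            · rw [show (decide (0 < x - prev)) = true from by simpa using h3]
              rw [show (decide (1 ≤ x - prev ∧ x - prev ≤ 3)) = true from by simp; omega]
              simp
            · rw [show (decide (0 < x - prev)) = false from by simpa using h3]
              rw [show (decide (1 ≤ x - prev ∧ x - prev ≤ 3)) = false from by simp; omega]
              simp
      | false =>
        simp only [pvInnerA, pvAllN, ih, hpos, gt_iff_lt, lt_abs, eN, Option.elim]
        by_cases h1 : 3 < x - prev ∨ 3 < -(x - prev)
        · rw [if_pos (by simpa using h1),
              show (decide (-3 ≤ x - prev ∧ x - prev ≤ -1)) = false from by simp; omega]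
          simp
        · rw [if_neg (by simpa using h1)]
          by_cases h2 : x - prev = 0
          · rw [if_pos h2,
                show (decide (-3 ≤ x - prev ∧ x - prev ≤ -1)) = false from by simp; omega]
            simp
          · rw [if_neg h2]
            by_cases h3 : (0 : Int) < x - prev
            · rw [show (decide (0 < x - prev)) = true from by simpa using h3]
              rw [show (decide (-3 ≤ x - prev ∧ x - prev ≤ -1)) = false from by simp; omega]
              simp
            · rw [show (decide (0 < x - prev)) = false from by simpa using h3]
              rw [show (decide (-3 ≤ x - prev ∧ x - prev ≤ -1)) = true from by simp; omega]
              simp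

theorem pvZipAll_eqP (rest : List Int) : ∀ prev : Int,
    (((prev :: rest).zip rest).map (fun p => p.2 - p.1)).all
        (fun d => decide (1 ≤ d) && decide (d ≤ 3)) = pvAllP prev rest := by
  induction rest with
  | nil => intro prev; rfl
  | cons x t ih => intro prev; simp [pvAllP, ← ih x]

theorem pvZipAll_eqN (rest : List Int) : ∀ prev : Int,
    (((prev :: rest).zip rest).map (fun p => p.2 - p.1)).all
        (fun d => decide (-3 ≤ d) && decide (d ≤ -1)) = pvAllN prev rest := by
  induction rest with
  | nil => intro prev; rfl
  | cons x t ih => intro prev; simp [pvAllN, ← ih x]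

theorem pvSafe_eq (prev : Int) (rest : List Int) :
    pvInnerA prev none rest = pvSafeB (prev :: rest) := by
  simp only [pvSafeB, List.drop_one, List.tail_cons]
  rw [pvInnerA_eq, pvZipAll_eqP, pvZipAll_eqN]

theorem pvFold_eq (reports : List (List Int)) (h : ∀ r ∈ reports, r ≠ []) : ∀ acc : Int,
    reports.foldl (fun safe report =>
      match PySem.List.pyGet? report 0 with
      | none => safe
      | some prev =>
        if pvInnerA prev none (PySem.List.slice report (some 1) none) then safe + 1 else safe) acc
    = reports.foldl (fun acc report => if pvSafeB report then acc + 1 else acc) acc := by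
  induction reports with
  | nil => intro acc; rfl
  | cons r rs ih =>
    intro acc
    have hr : r ≠ [] := h r (by simp)
    obtain ⟨prev, rest, rfl⟩ : ∃ p t, r = p :: t := by
      cases r with
      | nil => exact absurd rfl hr
      | cons a b => exact ⟨a, b, rfl⟩
    have hget : PySem.List.pyGet? (prev :: rest) (0 : Int) = some prev := by
      simp [PySem.List.pyGet?, PySem.List.pyIdx?]
    have hslice : PySem.List.slice (prev :: rest) (some (1 : Int)) none = rest := by
      simpa using PySem.List.slice_from_one (prev :: rest)
    have hhead : (match PySem.List.pyGet? (prev :: rest) (0 : Int) with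
        | none => acc
        | some p => if pvInnerA p none (PySem.List.slice (prev :: rest) (some 1) none) then acc + 1 else acc)
        = if pvSafeB (prev :: rest) then acc + 1 else acc := by
      simp only [hget, hslice, pvSafe_eq]
    rw [List.foldl_cons, List.foldl_cons, hhead, ih (fun x hx => h x (by simp [hx]))]

-- ===== VERDICT (by name: the statement is the Claim_ definition above) =====
theorem count_safe_spec : Claim_equal_count_safe := by
  intro reports _ hpre
  unfold Spec_count_safe count_safe count_safe_alt
  exact pvFold_eq reports hpre 0
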